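-- pv_equiv track=rewrite | github.com/psharma078/ED_for_TMD_bilayer | EntanglementSpectra/Checkerboard_savevec.py | bitstring_config
-- ===== SOURCE A (Python) =====
-- from itertools import combinations
--
-- def bitstring_config(sys_size, num_particle):
--     decimal_numbers = []
--     for ones_indices in combinations(range(sys_size), num_particle):
--         binary_str = ['0'] * sys_size
--         for idx in ones_indices:
--             binary_str[idx] = '1'
--         decimal_numbers.append(int(''.join(binary_str), 2))
--     return decimal_numbers
-- ===== SOURCE B (Python) =====
-- def bitstring_config(sys_size, num_particle):
--     decimal_numbers = []
--     # explicit-stack backtracking: frames are (pos, acc, remaining); the '1' branch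
--     # is pushed last so it is explored first, giving strictly descending output
--     stack = [(0, 0, num_particle)]
--     while stack:
--         pos, acc, remaining = stack.pop()
--         if remaining > sys_size - pos or remaining < 0:
--             continue  # prune: cannot place the remaining ones
--         if remaining == 0:
--             # only zeros can follow: finish the value in one shift
--             decimal_numbers.append(acc << (sys_size - pos))
--             continue
--         stack.append((pos + 1, acc * 2, remaining))
--         stack.append((pos + 1, acc * 2 + 1, remaining - 1))
--     return decimal_numbers
-- ===== Notes on version B (the rewrite author's own statement) =====
-- stated objective: alternative
-- what changed: Replaced the combinations-of-indices + string-building + int(s,2) pipeline by explicit-stack backtracking that builds the decimal values arithmetically bit by bit ('1' branch explored first, with pruning and a one-shift finish once no ones remain), never materialising index tuples or strings.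
-- crash fix: On num_particle < 0 (ValueError from combinations) and on num_particle == 0 with sys_size <= 0 (ValueError from int('',2)) A raises; B returns the natural value ([] resp. [0] for sys_size==0). — e.g. on bitstring_config(0, 0): A raises ValueError, B returns [0]
import Mathlib
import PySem

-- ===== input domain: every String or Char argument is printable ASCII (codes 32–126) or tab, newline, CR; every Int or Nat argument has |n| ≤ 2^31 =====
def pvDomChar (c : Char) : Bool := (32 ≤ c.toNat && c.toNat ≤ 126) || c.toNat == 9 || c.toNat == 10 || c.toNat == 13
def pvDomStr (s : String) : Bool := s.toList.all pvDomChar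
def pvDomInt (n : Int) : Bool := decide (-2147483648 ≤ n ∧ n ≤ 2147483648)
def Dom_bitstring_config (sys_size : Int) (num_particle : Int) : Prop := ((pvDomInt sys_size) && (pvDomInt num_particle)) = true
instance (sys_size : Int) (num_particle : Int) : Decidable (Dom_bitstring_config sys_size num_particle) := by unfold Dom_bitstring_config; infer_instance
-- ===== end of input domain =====

-- B replaces A's combinations + string building + int(s,2) by a recursive backtracking
-- enumerator building the decimal values arithmetically (alternative decomposition, same cost).


-- ===== PORT A =====
-- itertools.combinations over a list, r ≥ 0, lexicographic order of index tuples
def pyCombos {α : Type} : List α → Nat → List (List α)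
  | _, 0 => [[]]
  | [], _+1 => []
  | x :: xs, k+1 =>
      -- itertools yields nothing when r > len(pool) (its documented short-circuit)
      if xs.length < k then []
      else ((pyCombos xs k).map (fun c => x :: c)) ++ pyCombos xs (k+1)

-- int(''.join(binary_str), 2): exact on strings of '0'/'1' chars (the only ones A builds
-- inside Pre_; the empty string, where Python raises, is excluded by Pre_)
def pvIntOfBin (cs : List Char) : Int :=
  cs.foldl (fun acc c => 2 * acc + (if c = '1' then 1 else 0)) 0

def bitstring_config (sys_size : Int) (num_particle : Int) : List Int :=
  -- num_particle < 0 makes combinations raise ValueError: excluded by Pre_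
  if num_particle < 0 then []
  else
    (pyCombos (PySem.List.pyRange 0 sys_size 1) num_particle.toNat).map (fun ones =>
      pvIntOfBin (ones.foldl (fun bs i => bs.set i.toNat '1')
        (List.replicate sys_size.toNat '0')))

-- ===== PORT B =====
-- the while-stack loop of Source B; a frame (left, acc, rem) is Source B's (pos, acc, remaining)
-- with left = sys_size - pos; Python pushes the '0' branch first, so the Lean list
-- (whose head is the top of the stack) carries the '1' branch first
def pvLoop : List (Nat × Int × Int) → List Int → List Int
  | [], out => out
  | (0, acc, rem) :: stack, out =>
      if rem > (0:Int) ∨ rem < 0 then pvLoop stack out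
      -- here remaining = 0 is forced, so Source B's 'remaining == 0' branch fires: acc << 0 = acc
      else pvLoop stack (out ++ [acc])
  | (l+1, acc, rem) :: stack, out =>
      if rem > (l:Int) + 1 ∨ rem < 0 then pvLoop stack out
      else if rem = 0 then pvLoop stack (out ++ [acc <<< (l+1)])
      else pvLoop ((l, acc * 2 + 1, rem - 1) :: (l, acc * 2, rem) :: stack) out
termination_by stack _ => (stack.map (fun f => 3 ^ f.1)).sum
decreasing_by
  · simp only [List.map_cons, List.sum_cons]; omega
  · simp only [List.map_cons, List.sum_cons]; omega
  · have h0 : 0 < 3 ^ (l+1) := pow_pos (by norm_num) (l+1)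
    simp only [List.map_cons, List.sum_cons]; omega
  · have h0 : 0 < 3 ^ (l+1) := pow_pos (by norm_num) (l+1)
    simp only [List.map_cons, List.sum_cons]; omega
  · have h0 : 0 < 3 ^ l := pow_pos (by norm_num) l
    simp only [List.map_cons, List.sum_cons]; omega

def bitstring_config_alt (sys_size : Int) (num_particle : Int) : List Int :=
  -- for sys_size < 0 the prune at pos = 0 always fires (remaining > sys_size or remaining < 0)
  if sys_size < 0 then [] else pvLoop [(sys_size.toNat, 0, num_particle)] []

-- ===== PRECONDITION & SPEC =====
-- Pre_ excludes exactly the inputs where A raises ValueError: num_particle < 0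
-- (combinations) and num_particle = 0 with sys_size ≤ 0 (int('', 2)).
def Pre_bitstring_config (sys_size : Int) (num_particle : Int) : Prop :=
  0 ≤ num_particle ∧ (0 < sys_size ∨ 0 < num_particle)
instance (sys_size : Int) (num_particle : Int) : Decidable (Pre_bitstring_config sys_size num_particle) := by unfold Pre_bitstring_config; infer_instance

def pvWitness_bitstring_config : Int × Int := (4, 2)

-- On num_particle < 0 (ValueError from combinations) and on num_particle = 0 with
-- sys_size ≤ 0 (ValueError from int('',2)) A raises; B returns the natural value
-- (checked below by bitstring_config_raises).
def Raises_bitstring_config (sys_size : Int) (num_particle : Int) : Prop :=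
  num_particle < 0 ∨ (num_particle = 0 ∧ sys_size ≤ 0)
instance (sys_size : Int) (num_particle : Int) : Decidable (Raises_bitstring_config sys_size num_particle) := by unfold Raises_bitstring_config; infer_instance
def pvRaiseWitness_bitstring_config : Int × Int := (0, 0)
def pvRaiseWitnessOut_bitstring_config : List Int := [0]

def Spec_bitstring_config (sys_size : Int) (num_particle : Int) (out : List Int) : Prop := out = bitstring_config_alt sys_size num_particle
instance (sys_size : Int) (num_particle : Int) (out : List Int) : Decidable (Spec_bitstring_config sys_size num_particle out) := by unfold Spec_bitstring_config; infer_instance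

-- ===== CLAIM (what is proved, stated in full; the proofs are below) =====
def Claim_equal_bitstring_config : Prop := ∀ (sys_size : Int) (num_particle : Int), Dom_bitstring_config sys_size num_particle → Pre_bitstring_config sys_size num_particle → Spec_bitstring_config sys_size num_particle (bitstring_config sys_size num_particle)

def Claim_raises_bitstring_config : Prop := (∀ (sys_size : Int) (num_particle : Int), Dom_bitstring_config sys_size num_particle → Raises_bitstring_config sys_size num_particle → ¬ Pre_bitstring_config sys_size num_particle) ∧ (Dom_bitstring_config (pvRaiseWitness_bitstring_config.1) (pvRaiseWitness_bitstring_config.2) ∧ Raises_bitstring_config (pvRaiseWitness_bitstring_config.1) (pvRaiseWitness_bitstring_config.2) ∧ bitstring_config_alt (pvRaiseWitness_bitstring_config.1) (pvRaiseWitness_bitstring_config.2) = pvRaiseWitnessOut_bitstring_config)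

-- ===== LEMMAS AND PROOFS =====

-- recursive description of what one stack frame contributes (proof helper)
def pvPlace : Nat → Int → Int → List Int
  | 0, acc, rem => if rem > (0:Int) ∨ rem < 0 then [] else [acc]
  | l+1, acc, rem =>
      if rem > (l:Int) + 1 ∨ rem < 0 then []
      else if rem = 0 then [acc <<< (l+1)]
      else pvPlace l (acc * 2 + 1) (rem - 1) ++ pvPlace l (acc * 2) rem

-- processing one frame appends its pvPlace output
theorem pvLoop_frame (l : Nat) : ∀ (acc rem : Int) (S : List (Nat × Int × Int)) (out : List Int),
    pvLoop ((l, acc, rem) :: S) out = pvLoop S (out ++ pvPlace l acc rem) := by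
  induction l with
  | zero =>
    intro acc rem S out
    rw [pvLoop, pvPlace]
    split_ifs
    · simp
    · rfl
  | succ l ih =>
    intro acc rem S out
    rw [pvLoop, pvPlace]
    split_ifs with h h0
    · simp
    · rfl
    · rw [ih, ih, List.append_assoc]

-- closed recursive characterisation both ports are reduced to
def pvSpecList : Nat → Nat → List Int
  | _, 0 => [0]
  | 0, _+1 => []
  | n+1, k+1 => ((pvSpecList n k).map (fun v => 2 ^ n + v)) ++ pvSpecList n (k+1)

theorem pvSpecList_nil (n k : Nat) (h : n < k) : pvSpecList n k = [] := by
  induction n generalizing k with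
  | zero => cases k with
    | zero => omega
    | succ k => rfl
  | succ n ih => cases k with
    | zero => omega
    | succ k => simp [pvSpecList, ih k (by omega), ih (k+1) (by omega)]

-- B side: pvPlace in terms of pvSpecList
theorem pvPlace_eq (n : Nat) (acc rem : Int) (h : 0 ≤ rem) :
    pvPlace n acc rem = (pvSpecList n rem.toNat).map (fun v => acc * 2 ^ n + v) := by
  induction n generalizing acc rem with
  | zero =>
    rcases Int.le_iff_lt_or_eq.mp h with h1 | h1
    · simp [pvPlace, h1, pvSpecList_nil 0 rem.toNat (by omega)]
    · simp [pvPlace, ← h1, pvSpecList]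
  | succ n ih =>
    by_cases hr : rem > (n:Int) + 1
    · have : n + 1 < rem.toNat := by omega
      simp [pvPlace, hr, pvSpecList_nil _ _ this]
    · rcases Int.le_iff_lt_or_eq.mp h with h1 | h1
      · have h0 : 0 ≤ rem - 1 := by omega
        have ht : rem.toNat = (rem - 1).toNat + 1 := by omega
        rw [pvPlace, if_neg (by omega), if_neg (by omega), ih _ _ h0, ih _ _ h, ht, pvSpecList,
            List.map_append, List.map_map]
        congr 1
        · apply List.map_congr_left; intro a _; simp [Function.comp]; ring
        · apply List.map_congr_left; intro a _; ring
      · rw [pvPlace, if_neg (by omega), if_pos h1.symm, ← h1]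
        simp [pvSpecList, Int.shiftLeft_eq]

-- A side --------------------------------------------------------------------

theorem pvIntOfBin_aux (cs : List Char) (acc : Int) :
    cs.foldl (fun acc c => 2 * acc + (if c = '1' then 1 else 0)) acc
      = acc * 2 ^ cs.length + pvIntOfBin cs := by
  induction cs generalizing acc with
  | nil => simp [pvIntOfBin]
  | cons c cs ih =>
    simp only [List.foldl_cons, List.length_cons, pvIntOfBin] at *
    rw [ih, ih (2 * 0 + _)]
    ring

theorem pvIntOfBin_cons (c : Char) (cs : List Char) :
    pvIntOfBin (c :: cs) = (if c = '1' then 1 else 0) * 2 ^ cs.length + pvIntOfBin cs := by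
  simp only [pvIntOfBin, List.foldl_cons]
  rw [pvIntOfBin_aux]
  congr 1
  ring

theorem pvIntOfBin_zeros (n : Nat) : pvIntOfBin (List.replicate n '0') = 0 := by
  induction n with
  | zero => rfl
  | succ n ih => rw [List.replicate_succ, pvIntOfBin_cons, ih]; simp

theorem pvSet_len (bs : List Char) (J : List Int) :
    (J.foldl (fun bs i => bs.set i.toNat '1') bs).length = bs.length := by
  induction J generalizing bs with
  | nil => rfl
  | cons j J ih => simp [List.foldl_cons, ih]

-- shifting all indices by 1 skips the head cell
theorem pvSet_shift (c : Char) (bs : List Char) (J : List Int) (hJ : ∀ i ∈ J, 0 ≤ i) :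
    ((J.map (fun i => i + 1)).foldl (fun bs i => bs.set i.toNat '1') (c :: bs))
      = c :: J.foldl (fun bs i => bs.set i.toNat '1') bs := by
  induction J generalizing bs with
  | nil => rfl
  | cons j J ih =>
    have hj : 0 ≤ j := hJ j (by simp)
    have : (j + 1).toNat = j.toNat + 1 := by omega
    simp only [List.map_cons, List.foldl_cons, this, List.set_cons_succ]
    exact ih (bs.set j.toNat '1') (fun i hi => hJ i (by simp [hi]))

def pvBuild (n : Nat) (J : List Int) : Int :=
  pvIntOfBin (J.foldl (fun bs i => bs.set i.toNat '1') (List.replicate n '0'))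

theorem pvBuild_shift (n : Nat) (J : List Int) (hJ : ∀ i ∈ J, 0 ≤ i) :
    pvBuild (n+1) (J.map (fun i => i + 1)) = pvBuild n J := by
  unfold pvBuild
  rw [List.replicate_succ, pvSet_shift _ _ _ hJ, pvIntOfBin_cons]
  simp

theorem pvBuild_cons_zero (n : Nat) (J : List Int) (hJ : ∀ i ∈ J, 0 ≤ i) :
    pvBuild (n+1) ((0:Int) :: J.map (fun i => i + 1)) = 2 ^ n + pvBuild n J := by
  unfold pvBuild
  rw [List.replicate_succ]
  simp only [List.foldl_cons, Int.toNat_zero, List.set_cons_zero]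
  rw [pvSet_shift _ _ _ hJ, pvIntOfBin_cons]
  simp [pvSet_len]

theorem pyCombos_map {α β : Type} (f : α → β) (L : List α) (k : Nat) :
    pyCombos (L.map f) k = (pyCombos L k).map (List.map f) := by
  induction L generalizing k with
  | nil => cases k <;> simp [pyCombos]
  | cons x xs ih =>
    cases k with
    | zero => simp [pyCombos]
    | succ k =>
      simp only [List.map_cons, pyCombos, List.length_map]
      split_ifs with h
      · rfl
      · simp [ih, List.map_map, Function.comp]

theorem pyCombos_mem {α : Type} (L : List α) (k : Nat) (J : List α)
    (h : J ∈ pyCombos L k) : ∀ x ∈ J, x ∈ L := by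
  induction L generalizing k J with
  | nil =>
    cases k with
    | zero => simp [pyCombos] at h; simp [h]
    | succ k => simp [pyCombos] at h
  | cons a L ih =>
    cases k with
    | zero => simp [pyCombos] at h; simp [h]
    | succ k =>
      rw [pyCombos] at h
      split_ifs at h
      · simp at h
      simp only [List.mem_append, List.mem_map] at h
      rcases h with ⟨J', hJ', rfl⟩ | h
      · intro x hx
        rcases List.mem_cons.mp hx with rfl | hx
        · simp
        · exact List.mem_cons_of_mem _ (ih k J' hJ' x hx)
      · intro x hx; exact List.mem_cons_of_mem _ (ih (k+1) J h x hx)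

theorem pyRange_succ_shift (n : Nat) :
    PySem.List.pyRange 0 ((n:Int)+1) 1
      = (0:Int) :: (PySem.List.pyRange 0 (n:Int) 1).map (fun i => i + 1) := by
  rw [PySem.List.pyRange_one, PySem.List.pyRange_one]
  have h1 : (((n:Int)+1) - 0).toNat = n+1 := by omega
  have h2 : ((n:Int) - 0).toNat = n := by omega
  rw [h1, h2, List.range_succ_eq_map]
  simp only [List.map_cons, List.map_map]
  norm_num

theorem pvMain (n k : Nat) :
    (pyCombos (PySem.List.pyRange 0 (n:Int) 1) k).map (pvBuild n) = pvSpecList n k := by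
  induction n generalizing k with
  | zero =>
    cases k with
    | zero =>
      simp only [Nat.cast_zero]
      have : PySem.List.pyRange 0 (0:Int) 1 = [] := by decide
      rw [this]; simp [pyCombos, pvBuild, pvIntOfBin, pvSpecList]
    | succ k =>
      have : PySem.List.pyRange 0 ((0:Nat):Int) 1 = [] := by decide
      rw [this]; rfl
  | succ n ih =>
    cases k with
    | zero =>
      simp only [pyCombos, List.map_cons, List.map_nil, pvSpecList]
      simp [pvBuild, pvIntOfBin_zeros]
    | succ k =>
      have hsh := pyRange_succ_shift n
      have hlen : ((PySem.List.pyRange 0 (n:Int) 1).map (fun i => i + 1)).length = n := by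
        simp [PySem.List.pyRange_one]
      push_cast
      rw [hsh]
      by_cases hnk : n < k
      · rw [pyCombos, if_pos (by rw [hlen]; exact hnk), pvSpecList_nil (n+1) (k+1) (by omega)]
        rfl
      rw [pyCombos, if_neg (by rw [hlen]; exact hnk)]
      simp only [pyCombos_map, List.map_append, List.map_map]
      have hmem : ∀ J ∈ pyCombos (PySem.List.pyRange 0 (n:Int) 1) k, ∀ i ∈ J, 0 ≤ i := by
        intro J hJ i hi
        have := pyCombos_mem _ _ _ hJ i hi
        have := PySem.List.mem_pyRange_one.mp this
        omega
      have hmem' : ∀ J ∈ pyCombos (PySem.List.pyRange 0 (n:Int) 1) (k+1), ∀ i ∈ J, 0 ≤ i := by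
        intro J hJ i hi
        have := pyCombos_mem _ _ _ hJ i hi
        have := PySem.List.mem_pyRange_one.mp this
        omega
      rw [pvSpecList]
      congr 1
      · rw [← ih k, List.map_map]
        apply List.map_congr_left
        intro J hJ
        exact pvBuild_cons_zero n J (hmem J hJ)
      · rw [← ih (k+1)]
        apply List.map_congr_left
        intro J hJ
        exact pvBuild_shift n J (hmem' J hJ)

-- ===== VERDICT (by name: the statement is the Claim_ definition above) =====
theorem bitstring_config_spec : Claim_equal_bitstring_config := by
  intro s k _ hpre
  obtain ⟨hk, hs⟩ := hpre
  unfold Spec_bitstring_config bitstring_config bitstring_config_alt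
  rw [if_neg (by omega)]
  by_cases hs0 : s < 0
  · -- s < 0 forces 0 < k; range is empty, pyCombos [] (k'+1) = []
    have hrange : PySem.List.pyRange 0 s 1 = [] := by
      rw [PySem.List.pyRange_one, show (s - 0).toNat = 0 by omega]
      rfl
    have hk0 : 0 < k := by omega
    have : k.toNat = (k.toNat - 1) + 1 := by omega
    rw [if_pos hs0, hrange, this]
    rfl
  · rw [if_neg hs0, pvLoop_frame, pvLoop, List.nil_append, pvPlace_eq _ _ _ hk]
    have hs' : ((s.toNat : Nat) : Int) = s := by omega
    have hm := pvMain s.toNat k.toNat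
    rw [hs'] at hm
    show List.map (pvBuild s.toNat) (pyCombos (PySem.List.pyRange 0 s 1) k.toNat)
        = List.map (fun v => (0:Int) * 2 ^ s.toNat + v) (pvSpecList s.toNat k.toNat)
    rw [hm]
    simp

@[simp] theorem bitstring_config_raises : Claim_raises_bitstring_config := by
  unfold Claim_raises_bitstring_config
  constructor
  · intro s k _ hr hp
    unfold Raises_bitstring_config at hr
    unfold Pre_bitstring_config at hp
    omega
  · refine ⟨by decide, by decide, ?_⟩
    show bitstring_config_alt 0 0 = [0]
    rw [bitstring_config_alt, if_neg (by norm_num), pvLoop_frame, pvLoop]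
    decide
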